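-- pv_equiv track=rewrite | github.com/xvanov/algorithms | ex/rec.py | noOfOdd5a
-- ===== SOURCE A (Python) =====
-- def noOfOdd5a( arr, iFrom, iTo ):
--     if iFrom > iTo: return 0 # be careful
--     if iFrom == iTo: return arr[iFrom] % 2
--
--     iFifth1 = iFrom + 1*(iTo-iFrom) // 5
--     iFifth2 = iFrom + 2*(iTo-iFrom) // 5
--     iFifth3 = iFrom + 3*(iTo-iFrom) // 5
--     iFifth4 = iFrom + 4*(iTo-iFrom) // 5
--
--     return   noOfOdd5a( arr, iFrom, iFifth1 ) \
--            + noOfOdd5a( arr, iFifth1+1, iFifth2 ) \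
--            + noOfOdd5a( arr, iFifth2+1, iFifth3 ) \
--            + noOfOdd5a( arr, iFifth3+1, iFifth4 ) \
--            + noOfOdd5a( arr, iFifth4+1, iTo )
-- ===== SOURCE B (Python) =====
-- def noOfOdd5a(arr, iFrom, iTo):
--     return sum(arr[i] % 2 for i in range(iFrom, iTo + 1))
-- ===== Notes on version B (the rewrite author's own statement) =====
-- stated objective: simpler
-- what changed: Replaces the five-way fifths-splitting recursion with a single linear scan summing arr[i] % 2 over the inclusive index range.
import Mathlib
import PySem

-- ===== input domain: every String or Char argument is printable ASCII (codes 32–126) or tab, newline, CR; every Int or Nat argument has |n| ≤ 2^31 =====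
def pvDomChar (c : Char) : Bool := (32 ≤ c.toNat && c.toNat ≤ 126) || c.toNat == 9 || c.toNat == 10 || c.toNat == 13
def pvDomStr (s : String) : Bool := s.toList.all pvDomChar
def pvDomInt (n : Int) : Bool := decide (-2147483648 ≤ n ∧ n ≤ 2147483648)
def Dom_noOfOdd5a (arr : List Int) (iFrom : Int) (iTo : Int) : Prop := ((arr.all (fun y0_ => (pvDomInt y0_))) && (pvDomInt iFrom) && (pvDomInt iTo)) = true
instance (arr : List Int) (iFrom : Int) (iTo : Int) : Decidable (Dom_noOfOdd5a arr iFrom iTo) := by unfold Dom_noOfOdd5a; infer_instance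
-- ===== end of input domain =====

-- B replaces A's five-way fifths-splitting recursion with a single linear scan (simpler; same O(n) cost).

-- ===== PORT A =====
-- A's recursion, with a Nat fuel making the same computation total; each recursive call shrinks
-- iTo - iFrom, so fuel (iTo - iFrom).toNat + 1 always suffices (proved in noOfOdd5aGo_eq_alt below).
def noOfOdd5aGo (fuel : Nat) (arr : List Int) (iFrom : Int) (iTo : Int) : Int :=
  match fuel with
  | 0 => 0
  | fuel + 1 =>
    if iFrom > iTo then 0
    else if iFrom = iTo then PySem.Int.mod (PySem.List.pyGetD arr iFrom 0) 2
    else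
      let iFifth1 := iFrom + PySem.Int.floordiv (1 * (iTo - iFrom)) 5
      let iFifth2 := iFrom + PySem.Int.floordiv (2 * (iTo - iFrom)) 5
      let iFifth3 := iFrom + PySem.Int.floordiv (3 * (iTo - iFrom)) 5
      let iFifth4 := iFrom + PySem.Int.floordiv (4 * (iTo - iFrom)) 5
      noOfOdd5aGo fuel arr iFrom iFifth1
        + noOfOdd5aGo fuel arr (iFifth1 + 1) iFifth2
        + noOfOdd5aGo fuel arr (iFifth2 + 1) iFifth3
        + noOfOdd5aGo fuel arr (iFifth3 + 1) iFifth4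
        + noOfOdd5aGo fuel arr (iFifth4 + 1) iTo

def noOfOdd5a (arr : List Int) (iFrom : Int) (iTo : Int) : Int :=
  noOfOdd5aGo ((iTo - iFrom).toNat + 1) arr iFrom iTo

-- ===== PORT B =====
-- sum(arr[i] % 2 for i in range(iFrom, iTo + 1))
def noOfOdd5a_alt (arr : List Int) (iFrom : Int) (iTo : Int) : Int :=
  ((PySem.List.pyRange iFrom (iTo + 1) 1).map
    (fun i => PySem.Int.mod (PySem.List.pyGetD arr i 0) 2)).sum

-- ===== PRECONDITION & SPEC =====
-- Pre_ excludes exactly the inputs where Python A raises IndexError: a nonempty index range one of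
-- whose endpoints leaves the valid (negative-index-inclusive) range of arr.  Python B raises there too.
def Pre_noOfOdd5a (arr : List Int) (iFrom : Int) (iTo : Int) : Prop :=
  iFrom > iTo ∨ (-(arr.length : Int) ≤ iFrom ∧ iTo < (arr.length : Int))
instance (arr : List Int) (iFrom : Int) (iTo : Int) : Decidable (Pre_noOfOdd5a arr iFrom iTo) := by
  unfold Pre_noOfOdd5a; infer_instance
def pvWitness_noOfOdd5a : List Int × Int × Int := ([3, 4, 5, 6, 7], 1, 4)

def Spec_noOfOdd5a (arr : List Int) (iFrom : Int) (iTo : Int) (out : Int) : Prop := out = noOfOdd5a_alt arr iFrom iTo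
instance (arr : List Int) (iFrom : Int) (iTo : Int) (out : Int) : Decidable (Spec_noOfOdd5a arr iFrom iTo out) := by unfold Spec_noOfOdd5a; infer_instance

-- ===== CLAIM (what is proved, stated in full; the proofs are below) =====
def Claim_equal_noOfOdd5a : Prop := ∀ (arr : List Int) (iFrom : Int) (iTo : Int), Dom_noOfOdd5a arr iFrom iTo → Pre_noOfOdd5a arr iFrom iTo → Spec_noOfOdd5a arr iFrom iTo (noOfOdd5a arr iFrom iTo)

-- ===== LEMMAS AND PROOFS =====

-- splitting the scan-sum at any interior point
theorem alt_split (arr : List Int) (a m b : Int) (h1 : a ≤ m + 1) (h2 : m ≤ b) :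
    noOfOdd5a_alt arr a b = noOfOdd5a_alt arr a m + noOfOdd5a_alt arr (m + 1) b := by
  unfold noOfOdd5a_alt
  rw [PySem.List.pyRange_one_append a (m + 1) (b + 1) h1 (by omega), List.map_append,
    List.sum_append]

-- any sufficient fuel computes the scan-sum
theorem noOfOdd5aGo_eq_alt (arr : List Int) (fuel : Nat) :
    ∀ (a b : Int), (b - a).toNat < fuel → noOfOdd5aGo fuel arr a b = noOfOdd5a_alt arr a b := by
  induction fuel with
  | zero => intro a b h; omega
  | succ fuel ih =>
      intro a b hf
      rw [noOfOdd5aGo]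
      split_ifs with h1 h2
      · unfold noOfOdd5a_alt
        rw [PySem.List.pyRange_one_eq_nil (by omega)]
        simp
      · unfold noOfOdd5a_alt
        subst h2
        rw [PySem.List.pyRange_one_cons (by omega), PySem.List.pyRange_one_eq_nil (by omega)]
        simp
      · simp only [PySem.Int.floordiv_eq_ediv_of_pos (by norm_num : (0:Int) < 5)]
        rw [ih a (a + 1 * (b - a) / 5) (by omega),
          ih (a + 1 * (b - a) / 5 + 1) (a + 2 * (b - a) / 5) (by omega),
          ih (a + 2 * (b - a) / 5 + 1) (a + 3 * (b - a) / 5) (by omega),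
          ih (a + 3 * (b - a) / 5 + 1) (a + 4 * (b - a) / 5) (by omega),
          ih (a + 4 * (b - a) / 5 + 1) b (by omega)]
        rw [alt_split arr a (a + 1 * (b - a) / 5) b (by omega) (by omega),
          alt_split arr (a + 1 * (b - a) / 5 + 1) (a + 2 * (b - a) / 5) b (by omega) (by omega),
          alt_split arr (a + 2 * (b - a) / 5 + 1) (a + 3 * (b - a) / 5) b (by omega) (by omega),
          alt_split arr (a + 3 * (b - a) / 5 + 1) (a + 4 * (b - a) / 5) b (by omega) (by omega)]
        ring

theorem noOfOdd5a_eq_alt (arr : List Int) (a b : Int) :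
    noOfOdd5a arr a b = noOfOdd5a_alt arr a b := by
  exact noOfOdd5aGo_eq_alt arr ((b - a).toNat + 1) a b (by omega)

-- ===== VERDICT (by name: the statement is the Claim_ definition above) =====
theorem noOfOdd5a_spec : Claim_equal_noOfOdd5a := by
  intro arr iFrom iTo _ _
  exact noOfOdd5a_eq_alt arr iFrom iTo
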